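-- pv_equiv track=rewrite | github.com/tlastelick1/Malware-Analysis-Backend | Capstone-Analyzer-Code-main/repl/src/osa.py | get_osa_content
-- ===== SOURCE A (Python) =====
-- def get_osa_content(source: str) -> str:
--     array = []
--     is_string = False
--     string = ""
--     quotes = ("\"", "'", "`")
--     quote_mark = None
--
--     for c in source:
--         if c == ']' and not is_string:
--             break
--
--         if c in quotes and quote_mark is None:
--             quote_mark = c
--
--         if not is_string and c == quote_mark:
--             is_string = True
--             continue
--
--         if is_string and c == quote_mark:
--             is_string = False
--             array.append(string)
--             string = ""
--             quote_mark = None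
--             continue
--
--         if is_string and c != quote_mark:
--             string += c
--             continue
--
--     return array
-- ===== SOURCE B (Python) =====
-- def get_osa_content(source: str) -> str:
--     out = []
--     i = 0
--     n = len(source)
--     while i < n:
--         c = source[i]
--         if c == ']':
--             break
--         if c in "\"'`":
--             j = source.find(c, i + 1)
--             if j == -1:
--                 break
--             out.append(source[i + 1:j])
--             i = j + 1
--         else:
--             i += 1
--     return out
-- ===== Notes on version B (the rewrite author's own statement) =====
-- stated objective: simpler
-- what changed: Replaced A's per-character state machine (is_string flag, char accumulator, quote_mark) by an index loop that, at each opening quote, finds the closing quote with str.find and appends the slice between them.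
import Mathlib
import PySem

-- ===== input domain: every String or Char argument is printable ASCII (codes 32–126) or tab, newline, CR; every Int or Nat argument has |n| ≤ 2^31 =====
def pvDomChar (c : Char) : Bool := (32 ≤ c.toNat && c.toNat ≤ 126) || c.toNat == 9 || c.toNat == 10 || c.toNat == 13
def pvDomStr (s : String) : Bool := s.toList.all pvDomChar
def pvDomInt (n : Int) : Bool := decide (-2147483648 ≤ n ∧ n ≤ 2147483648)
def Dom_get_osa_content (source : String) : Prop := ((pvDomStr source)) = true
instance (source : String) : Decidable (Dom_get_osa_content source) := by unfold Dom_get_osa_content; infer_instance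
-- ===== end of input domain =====

-- B replaces A's per-character state machine (is_string/string/quote_mark accumulators)
-- by an index loop that slices each quoted run out with str.find; objective: simpler.

-- ===== PORT A =====
-- A's for-loop over source with state (array, is_string, string, quote_mark), branch for branch.
def pvLoopA : List Char → List String → Bool → List Char → Option Char → List String
  | [], array, _, _, _ => array
  | c :: rest, array, is_string, string, qm =>
    if c = ']' ∧ is_string = false then array
    else
      -- if c in quotes and quote_mark is None: quote_mark = c
      let qm1 := if (c = '"' ∨ c = '\'' ∨ c = '`') ∧ qm = none then some c else qm
      if is_string = false ∧ qm1 = some c then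
        pvLoopA rest array true string qm1
      else if is_string = true ∧ qm1 = some c then
        pvLoopA rest (array ++ [String.mk string]) false [] none
      else if is_string = true ∧ qm1 ≠ some c then
        pvLoopA rest array is_string (string ++ [c]) qm1
      else
        pvLoopA rest array is_string string qm1

def get_osa_content (source : String) : List String :=
  pvLoopA source.toList [] false [] none

-- ===== PORT B =====
-- B's while-loop: on a quote char, `find` the closing quote (dropWhile) and slice the
-- content out (takeWhile); break on ']' or an unclosed quote.
def pvLoopB : List Char → List String
  | [] => []
  | c :: rest =>
    if c = ']' then []
    else if c = '"' ∨ c = '\'' ∨ c = '`' then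
      match h : List.dropWhile (fun x => ¬ (x = c)) rest with
      | [] => []
      | _ :: post => String.mk (List.takeWhile (fun x => ¬ (x = c)) rest) :: pvLoopB post
    else pvLoopB rest
termination_by l => l.length
decreasing_by
  · have h1 : (List.dropWhile (fun x => ¬ (x = c)) rest).length ≤ rest.length :=
      List.length_dropWhile_le _ _
    rw [h] at h1
    simp at h1 ⊢
    omega
  · simp

def get_osa_content_alt (source : String) : List String :=
  pvLoopB source.toList

-- ===== PRECONDITION & SPEC =====
def Spec_get_osa_content (source : String) (out : List String) : Prop := out = get_osa_content_alt source
instance (source : String) (out : List String) : Decidable (Spec_get_osa_content source out) := by unfold Spec_get_osa_content; infer_instance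

-- ===== CLAIM (what is proved, stated in full; the proofs are below) =====
def Claim_equal_get_osa_content : Prop := ∀ (source : String), Dom_get_osa_content source → Spec_get_osa_content source (get_osa_content source)

-- ===== LEMMAS AND PROOFS =====

-- Inside a string opened with quote q, A accumulates exactly the chars before the next q.
lemma pvLoopA_inString (q : Char) :
    ∀ (chars : List Char) (array : List String) (str : List Char),
      pvLoopA chars array true str (some q) =
        (match List.dropWhile (fun x => ¬ (x = q)) chars with
         | [] => array
         | _ :: post =>
             pvLoopA post (array ++ [String.mk (str ++ List.takeWhile (fun x => ¬ (x = q)) chars)]) false [] none) := by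
  intro chars
  induction chars with
  | nil => intro array str; simp [pvLoopA]
  | cons c rest ih =>
    intro array str
    by_cases hc : c = q
    · subst hc
      simp [pvLoopA]
    · have hqc : ¬ q = c := fun h => hc h.symm
      have step : pvLoopA (c :: rest) array true str (some q)
          = pvLoopA rest array true (str ++ [c]) (some q) := by
        simp [pvLoopA, hqc]
      rw [step, ih]
      simp [hc]

lemma pvLoopA_eq_pvLoopB :
    ∀ (n : ℕ) (chars : List Char), chars.length ≤ n →
      ∀ (array : List String),
        pvLoopA chars array false [] none = array ++ pvLoopB chars := by
  intro n
  induction n with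
  | zero =>
    intro chars h array
    have : chars = [] := List.eq_nil_of_length_eq_zero (Nat.le_zero.mp h)
    subst this; simp [pvLoopA, pvLoopB]
  | succ n ih =>
    intro chars hlen array
    cases chars with
    | nil => simp [pvLoopA, pvLoopB]
    | cons c rest =>
      by_cases hbr : c = ']'
      · subst hbr; simp [pvLoopA, pvLoopB]
      · by_cases hq : c = '"' ∨ c = '\'' ∨ c = '`'
        · have hstep : pvLoopA (c :: rest) array false [] none
              = pvLoopA rest array true [] (some c) := by
            simp [pvLoopA, hbr, hq]
          rw [hstep, pvLoopA_inString, pvLoopB]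
          simp only [hbr, hq, if_true, if_false, or_true, true_or, if_neg (fun h => hbr h)]
          cases hdw : List.dropWhile (fun x => decide ¬ x = c) rest with
          | nil => simp [hdw]
          | cons d post =>
            have hpost : post.length ≤ n := by
              have h1 : (List.dropWhile (fun x => decide ¬ x = c) rest).length ≤ rest.length :=
                List.length_dropWhile_le _ _
              rw [hdw] at h1
              simp at h1
              simp at hlen
              omega
            simp only [hdw]
            rw [ih post hpost]
            simp
        · have hstep : pvLoopA (c :: rest) array false [] none
              = pvLoopA rest array false [] none := by
            simp [pvLoopA, hbr, hq]
          have hrest : rest.length ≤ n := by simp at hlen; omega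
          rw [hstep, ih rest hrest, pvLoopB]
          simp [hbr, hq]

-- ===== VERDICT (by name: the statement is the Claim_ definition above) =====
theorem get_osa_content_spec : Claim_equal_get_osa_content := by
  intro source _
  unfold Spec_get_osa_content get_osa_content get_osa_content_alt
  simpa using pvLoopA_eq_pvLoopB source.toList.length source.toList le_rfl []
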